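-- pv_equiv track=rewrite | github.com/ZombiesYard/IEFMMQ | adapters/prompting.py | _reprioritize_overlay_targets
-- ===== SOURCE A (Python) =====
-- def _reprioritize_overlay_targets(
--     overlay_targets: list[str],
--     priority_targets: list[str],
-- ) -> list[str]:
--     if not overlay_targets:
--         return []
--     seen: set[str] = set()
--     ordered: list[str] = []
--     for target in priority_targets:
--         if target in overlay_targets and target not in seen:
--             seen.add(target)
--             ordered.append(target)
--     for target in overlay_targets:
--         if target not in seen:
--             seen.add(target)
--             ordered.append(target)
--     return ordered
-- ===== SOURCE B (Python) =====
-- def _reprioritize_overlay_targets(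
--     overlay_targets: list[str],
--     priority_targets: list[str],
-- ) -> list[str]:
--     rank: dict[str, int] = {}
--     for i, target in enumerate(priority_targets):
--         rank.setdefault(target, i)
--     n = len(priority_targets)
--     deduped = list(dict.fromkeys(overlay_targets))
--     return sorted(deduped, key=lambda t: rank.get(t, n))
-- ===== Notes on version B (the rewrite author's own statement) =====
-- stated objective: faster
-- what changed: Replaces A's two accumulator loops (a priority scan whose 'target in overlay_targets' test rescans the overlay list, then an overlay sweep) by building a first-index rank table once, deduplicating the overlay with dict.fromkeys, and returning a single stable sort by rank.
import Mathlib
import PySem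

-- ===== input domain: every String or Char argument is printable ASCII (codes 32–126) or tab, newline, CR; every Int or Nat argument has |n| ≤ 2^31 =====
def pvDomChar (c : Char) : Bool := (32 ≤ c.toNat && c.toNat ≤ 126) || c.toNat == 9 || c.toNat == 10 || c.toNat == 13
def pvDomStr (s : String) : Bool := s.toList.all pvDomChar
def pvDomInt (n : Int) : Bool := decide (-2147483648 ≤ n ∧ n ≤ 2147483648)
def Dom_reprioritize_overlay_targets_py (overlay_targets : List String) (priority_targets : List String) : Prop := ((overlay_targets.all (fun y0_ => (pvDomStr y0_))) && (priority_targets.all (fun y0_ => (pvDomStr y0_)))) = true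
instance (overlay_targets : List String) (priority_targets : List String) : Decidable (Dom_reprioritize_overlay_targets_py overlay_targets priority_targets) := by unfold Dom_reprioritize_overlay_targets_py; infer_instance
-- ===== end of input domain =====

-- B replaces A's two seen/ordered accumulator loops by a first-index rank table, dedup, and one stable sort (idiomatic).

-- ===== PORT A =====
-- literal port of A: early return on empty overlay, then two loops threading (seen, ordered)
def reprioritize_overlay_targets_py (overlay_targets : List String) (priority_targets : List String) : List String :=
  if overlay_targets = [] then []
  else
    let st1 := priority_targets.foldl
      (fun (st : PySem.Set String × List String) target =>
        if overlay_targets.contains target && !(PySem.Set.contains st.1 target) then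
          (PySem.Set.add st.1 target, st.2 ++ [target])
        else st)
      (PySem.Set.empty, [])
    let st2 := overlay_targets.foldl
      (fun (st : PySem.Set String × List String) target =>
        if !(PySem.Set.contains st.1 target) then
          (PySem.Set.add st.1 target, st.2 ++ [target])
        else st)
      st1
    st2.2

-- ===== PORT B =====
-- literal port of Source B: rank = first-index table via setdefault, dedup = dict.fromkeys, stable sort by rank
def reprioritize_overlay_targets_py_alt (overlay_targets : List String) (priority_targets : List String) : List String :=
  let rank : PySem.Dict String Int :=
    (PySem.List.enumerate priority_targets 0).foldl
      (fun d p => d.setdefault p.2 p.1) PySem.Dict.empty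
  let n : Int := (priority_targets.length : Int)
  let deduped := PySem.List.dedup overlay_targets
  PySem.List.sorted deduped (fun t => rank.getD t n) false

-- ===== PRECONDITION & SPEC =====
def Spec_reprioritize_overlay_targets_py (overlay_targets : List String) (priority_targets : List String) (out : List String) : Prop := out = reprioritize_overlay_targets_py_alt overlay_targets priority_targets
instance (overlay_targets : List String) (priority_targets : List String) (out : List String) : Decidable (Spec_reprioritize_overlay_targets_py overlay_targets priority_targets out) := by unfold Spec_reprioritize_overlay_targets_py; infer_instance

-- ===== CLAIM (what is proved, stated in full; the proofs are below) =====
def Claim_equal_reprioritize_overlay_targets_py : Prop := ∀ (overlay_targets : List String) (priority_targets : List String), Dom_reprioritize_overlay_targets_py overlay_targets priority_targets → Spec_reprioritize_overlay_targets_py overlay_targets priority_targets (reprioritize_overlay_targets_py overlay_targets priority_targets)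

-- ===== LEMMAS AND PROOFS =====

-- dedup of l relative to the set of elements of o: first occurrences of l not in o, in order
def pvDr : List String → List String → List String
  | [], _ => []
  | t :: ts, o => if o.contains t then pvDr ts o else t :: pvDr ts (o ++ [t])

-- first-occurrence index
def pvFIdx : List String → String → Nat
  | [], _ => 0
  | t :: ts, x => if x = t then 0 else pvFIdx ts x + 1

-- the rank dictionary B builds
def pvRank (pr : List String) : PySem.Dict String Int :=
  (PySem.List.enumerate pr 0).foldl (fun d p => d.setdefault p.2 p.1) PySem.Dict.empty

-- loop 1 of A, with seen = ordered collapsed to one list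
def pvG1 (ov : List String) : List String → List String → List String
  | [], o => o
  | t :: ts, o => if ov.contains t && !o.contains t then pvG1 ov ts (o ++ [t]) else pvG1 ov ts o

-- the step functions of A's two folds, named
def pvF1 (ov : List String) (st : PySem.Set String × List String) (target : String) :
    PySem.Set String × List String :=
  if ov.contains target && !(PySem.Set.contains st.1 target) then
    (PySem.Set.add st.1 target, st.2 ++ [target])
  else st

def pvF2 (st : PySem.Set String × List String) (target : String) :
    PySem.Set String × List String :=
  if !(PySem.Set.contains st.1 target) then
    (PySem.Set.add st.1 target, st.2 ++ [target])
  else st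

lemma pvF1_pos (ov : List String) (o acc : List String) (t : String)
    (h : (ov.contains t && !o.contains t) = true) : pvF1 ov (o, acc) t = (o ++ [t], acc ++ [t]) := by
  simp only [Bool.and_eq_true, Bool.not_eq_true', List.contains_eq_mem, decide_eq_true_eq,
    decide_eq_false_iff_not] at h
  simp [pvF1, PySem.Set.contains, PySem.Set.add, h.1, h.2]

lemma pvF1_neg (ov : List String) (o acc : List String) (t : String)
    (h : ¬ ((ov.contains t && !o.contains t) = true)) : pvF1 ov (o, acc) t = (o, acc) := by
  simp only [pvF1, PySem.Set.contains]
  rw [if_neg h]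

lemma pvL1 (ov : List String) : ∀ (l : List String) (o : List String),
    l.foldl (pvF1 ov) (o, o) = (pvG1 ov l o, pvG1 ov l o) := by
  intro l
  induction l with
  | nil => intro o; simp [pvG1]
  | cons t ts ih =>
    intro o
    rw [List.foldl_cons]
    by_cases h : (ov.contains t && !o.contains t) = true
    · rw [pvF1_pos ov o o t h, ih]
      simp only [pvG1, h, if_pos]
    · rw [pvF1_neg ov o o t h, ih]
      simp only [pvG1, if_neg h]

lemma pvF2_pos (o acc : List String) (t : String)
    (h : t ∉ o) : pvF2 (o, acc) t = (o ++ [t], acc ++ [t]) := by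
  simp [pvF2, PySem.Set.contains, PySem.Set.add, h]

lemma pvF2_neg (o acc : List String) (t : String)
    (h : t ∈ o) : pvF2 (o, acc) t = (o, acc) := by
  simp [pvF2, PySem.Set.contains, h]

lemma pvL2 : ∀ (l : List String) (o : List String),
    l.foldl pvF2 (o, o) = (o ++ pvDr l o, o ++ pvDr l o) := by
  intro l
  induction l with
  | nil => intro o; simp [pvDr]
  | cons t ts ih =>
    intro o
    rw [List.foldl_cons]
    by_cases h : t ∈ o
    · rw [pvF2_neg o o t h, ih]
      simp [pvDr, h]
    · rw [pvF2_pos o o t h, ih]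
      simp [pvDr, h]

lemma pvDedup_eq_dr (l : List String) : PySem.List.dedup l = pvDr l [] := by
  have h : ∀ (l o : List String), l.foldl PySem.Set.add o = o ++ pvDr l o := by
    intro l
    induction l with
    | nil => intro o; simp [pvDr]
    | cons t ts ih =>
      intro o
      rw [List.foldl_cons]
      by_cases hc : t ∈ o
      · have : PySem.Set.add o t = o := by simp [PySem.Set.add, PySem.Set.contains, hc]
        rw [this, ih]
        simp [pvDr, hc]
      · have : PySem.Set.add o t = o ++ [t] := by
          simp [PySem.Set.add, PySem.Set.contains, hc]
        rw [this, ih]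
        simp [pvDr, hc]
  have h0 := h l []
  simpa [PySem.List.dedup, PySem.Set.ofList, PySem.Set.empty] using h0

-- normal form of pvDr: relative dedup = absolute dedup, filtered
lemma pvDr_filter : ∀ (l o : List String),
    pvDr l o = (pvDr l []).filter (fun t => !o.contains t) := by
  intro l
  induction l with
  | nil => intro o; simp [pvDr]
  | cons t ts ih =>
    intro o
    have base : pvDr (t :: ts) [] = t :: pvDr ts [t] := by simp [pvDr]
    by_cases h : t ∈ o
    · have l1 : pvDr (t :: ts) o = pvDr ts o := by simp [pvDr, h]
      rw [l1, ih o, base, List.filter_cons, if_neg (by simp [h]), ih [t], List.filter_filter]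
      have hfun : (fun a => ((!o.contains a) && !([t] : List String).contains a)) =
          (fun a => !o.contains a) := by
        funext a
        by_cases ha : a = t
        · simp [ha, h]
        · simp [ha]
      rw [hfun]
    · have l1 : pvDr (t :: ts) o = t :: pvDr ts (o ++ [t]) := by simp [pvDr, h]
      rw [l1, ih (o ++ [t]), base, List.filter_cons, if_pos (by simp [h]), ih [t],
        List.filter_filter]
      have hfun : (fun a => ((!o.contains a) && !([t] : List String).contains a)) =
          (fun a => !(o ++ [t]).contains a) := by
        funext a
        by_cases ha : a = t
        · simp [ha]
        · by_cases h2 : a ∈ o <;> simp [ha, h2]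
      rw [hfun]

lemma pvG1_filter (ov : List String) : ∀ (l o : List String),
    pvG1 ov l o = o ++ (pvDr l []).filter (fun t => ov.contains t && !o.contains t) := by
  intro l
  induction l with
  | nil => intro o; simp [pvG1, pvDr]
  | cons t ts ih =>
    intro o
    have base : pvDr (t :: ts) [] = t :: pvDr ts [t] := by simp [pvDr]
    rw [base]
    by_cases hb : (ov.contains t && !o.contains t) = true
    · have hm : t ∈ ov ∧ t ∉ o := by
        simpa [List.contains_eq_mem, Bool.and_eq_true, Bool.not_eq_true'] using hb
      have l1 : pvG1 ov (t :: ts) o = pvG1 ov ts (o ++ [t]) := by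
        simp [pvG1, hm.1, hm.2]
      rw [l1, ih (o ++ [t]), List.filter_cons, if_pos hb, pvDr_filter ts [t],
        List.filter_filter]
      have hfun : (fun a => ((ov.contains a && !o.contains a) &&
            !([t] : List String).contains a)) =
          (fun a => (ov.contains a && !(o ++ [t]).contains a)) := by
        funext a
        by_cases ha : a = t
        · simp [ha, hm.1]
        · by_cases h1 : a ∈ ov <;> by_cases h2 : a ∈ o <;> simp [ha, h1, h2]
      rw [hfun, List.append_assoc]
      rfl
    · have l1 : pvG1 ov (t :: ts) o = pvG1 ov ts o := by
        simp only [pvG1]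
        rw [if_neg hb]
      rw [l1, ih o, List.filter_cons, if_neg hb, pvDr_filter ts [t], List.filter_filter]
      have hm : ¬ (t ∈ ov ∧ t ∉ o) := by
        intro hc
        exact hb (by simp [List.contains_eq_mem, hc.1, hc.2])
      have hfun : (fun a => ((ov.contains a && !o.contains a) &&
            !([t] : List String).contains a)) =
          (fun a => (ov.contains a && !o.contains a)) := by
        funext a
        by_cases ha : a = t
        · subst ha
          by_cases h1 : a ∈ ov <;> by_cases h2 : a ∈ o <;> simp [h1, h2]
          exact absurd ⟨h1, h2⟩ hm
        · simp [ha]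
      rw [hfun]

lemma pvFIdx_lt : ∀ {l : List String} {x : String}, x ∈ l → pvFIdx l x < l.length := by
  intro l
  induction l with
  | nil => intro x h; simp at h
  | cons t ts ih =>
    intro x h
    by_cases hx : x = t
    · simp [pvFIdx, hx]
    · have hm : x ∈ ts := by
        rcases List.mem_cons.mp h with h1 | h1
        · exact absurd h1 hx
        · exact h1
      have := ih hm
      simp only [pvFIdx, hx, if_false, List.length_cons]
      omega

lemma pvGetNone {d : PySem.Dict String Int} {x : String} (h : d.contains x = false) :
    d.get? x = none := by
  simp only [PySem.Dict.contains, List.any_eq_false] at h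
  simp only [PySem.Dict.get?, Option.map_eq_none_iff, List.find?_eq_none]
  simpa using h

lemma pvRank_gen : ∀ (l : List String) (s : Int) (d : PySem.Dict String Int) (x : String),
    ((PySem.List.enumerate l s).foldl (fun d p => d.setdefault p.2 p.1) d).get? x =
      if d.contains x then d.get? x
      else if x ∈ l then some (s + (pvFIdx l x : Int)) else none := by
  intro l
  induction l with
  | nil =>
    intro s d x
    simp only [PySem.List.enumerate_nil, List.foldl_nil, List.not_mem_nil, if_false]
    by_cases hc : d.contains x
    · rw [if_pos hc]
    · rw [if_neg hc]
      exact pvGetNone (by simpa using hc)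
  | cons t ts ih =>
    intro s d x
    rw [PySem.List.enumerate_cons, List.foldl_cons]
    by_cases hd : d.contains t
    · rw [show (d.setdefault t s) = d from PySem.Dict.setdefault_of_contains d s hd, ih]
      by_cases hx : d.contains x
      · rw [if_pos hx, if_pos hx]
      · have hxt : x ≠ t := fun he => hx (he ▸ hd)
        rw [if_neg hx, if_neg hx]
        simp only [List.mem_cons, hxt, false_or]
        by_cases hmem : x ∈ ts
        · rw [if_pos hmem, if_pos hmem,
            show pvFIdx (t :: ts) x = pvFIdx ts x + 1 by simp [pvFIdx, hxt]]
          congr 1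
          push_cast
          ring
        · rw [if_neg hmem, if_neg hmem]
    · rw [show (d.setdefault t s) = d.insert t s from
        PySem.Dict.setdefault_of_not_contains d s (by simpa using hd), ih]
      by_cases hxt : x = t
      · subst hxt
        have hc : (d.insert x s).contains x = true := by
          rw [PySem.Dict.contains_insert]; simp
        rw [if_pos hc, if_neg hd, PySem.Dict.get?_insert_self]
        simp [pvFIdx]
      · have hc : (d.insert t s).contains x = d.contains x := by
          rw [PySem.Dict.contains_insert]
          simp [hxt]
        rw [hc]
        by_cases hx : d.contains x
        · rw [if_pos hx, if_pos hx, PySem.Dict.get?_insert_of_ne d s hxt]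
        · rw [if_neg hx, if_neg hx]
          simp only [List.mem_cons, hxt, false_or]
          by_cases hmem : x ∈ ts
          · rw [if_pos hmem, if_pos hmem,
              show pvFIdx (t :: ts) x = pvFIdx ts x + 1 by simp [pvFIdx, hxt]]
            congr 1
            push_cast
            ring
          · rw [if_neg hmem, if_neg hmem]

lemma pvRank_get? (pr : List String) (x : String) :
    (pvRank pr).get? x = if x ∈ pr then some ((pvFIdx pr x : Int)) else none := by
  have h := pvRank_gen pr 0 PySem.Dict.empty x
  rw [pvRank, h, if_neg (by simp [PySem.Dict.contains_empty])]
  by_cases hm : x ∈ pr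
  · rw [if_pos hm, if_pos hm]
    congr 1
    ring
  · rw [if_neg hm, if_neg hm]

lemma pvKey_mem {pr : List String} {x : String} (h : x ∈ pr) :
    (pvRank pr).getD x (pr.length : Int) = (pvFIdx pr x : Int) := by
  simp [PySem.Dict.getD, pvRank_get?, h]

lemma pvKey_not_mem {pr : List String} {x : String} (h : x ∉ pr) :
    (pvRank pr).getD x (pr.length : Int) = (pr.length : Int) := by
  simp [PySem.Dict.getD, pvRank_get?, h]

lemma pvKey_le (pr : List String) (x : String) :
    (pvRank pr).getD x (pr.length : Int) ≤ (pr.length : Int) := by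
  by_cases h : x ∈ pr
  · rw [pvKey_mem h]
    have := pvFIdx_lt h
    omega
  · rw [pvKey_not_mem h]

lemma pvKey_lt_iff (pr : List String) (x : String) :
    (pvRank pr).getD x (pr.length : Int) < (pr.length : Int) ↔ x ∈ pr := by
  by_cases h : x ∈ pr
  · rw [pvKey_mem h]
    have := pvFIdx_lt h
    simp [h]
    omega
  · rw [pvKey_not_mem h]
    simp [h]

lemma pvKey_eq_iff (pr : List String) (x : String) :
    (pvRank pr).getD x (pr.length : Int) = (pr.length : Int) ↔ x ∉ pr := by
  constructor
  · intro he h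
    have := (pvKey_lt_iff pr x).mpr h
    omega
  · exact pvKey_not_mem

lemma pvMem_dr (l : List String) (x : String) : x ∈ pvDr l [] ↔ x ∈ l := by
  rw [← pvDedup_eq_dr]
  exact PySem.List.mem_dedup l x

lemma pvNodup_dr (l : List String) : (pvDr l []).Nodup := by
  rw [← pvDedup_eq_dr]
  exact PySem.List.nodup_dedup l

-- dedup is strictly increasing in first-occurrence index
lemma pvPairIdx : ∀ (pr : List String),
    (pvDr pr []).Pairwise (fun a b => pvFIdx pr a < pvFIdx pr b) := by
  intro pr
  induction pr with
  | nil => simp [pvDr]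
  | cons t ts ih =>
    have base : pvDr (t :: ts) [] = t :: pvDr ts [t] := by simp [pvDr]
    rw [base, pvDr_filter ts [t]]
    constructor
    · intro b hb
      have hbne : b ≠ t := by
        rcases List.mem_filter.mp hb with ⟨_, hb2⟩
        simpa using hb2
      simp [pvFIdx, hbne]
    · have hf : ((pvDr ts []).filter (fun x => !([t] : List String).contains x)).Pairwise
          (fun a b => pvFIdx ts a < pvFIdx ts b) := List.Pairwise.filter _ ih
      refine hf.imp_of_mem ?_
      intro a b ha hb hab
      have hane : a ≠ t := by
        rcases List.mem_filter.mp ha with ⟨_, h2⟩; simpa using h2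
      have hbne : b ≠ t := by
        rcases List.mem_filter.mp hb with ⟨_, h2⟩; simpa using h2
      simp only [pvFIdx, hane, hbne, if_false]
      omega

lemma pvInsertBy_append (before : String → String → Bool) (x : String) :
    ∀ (l1 l2 : List String), (∀ y ∈ l2, before x y = true) →
    PySem.List.insertBy before x (l1 ++ l2) = PySem.List.insertBy before x l1 ++ l2 := by
  intro l1
  induction l1 with
  | nil =>
    intro l2 h
    cases l2 with
    | nil => simp [PySem.List.insertBy]
    | cons z zs =>
      have hz : before x z = true := h z (List.mem_cons_self)
      simp [PySem.List.insertBy, hz]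
  | cons y l1 ih =>
    intro l2 h
    by_cases hy : before x y = true
    · simp [PySem.List.insertBy, hy]
    · simp only [List.cons_append, PySem.List.insertBy, hy, Bool.false_eq_true, if_false,
        ih l2 h]

-- stable sort splits off the maximal-key elements, in input order
lemma pvSplit (key : String → Int) (c : Int) :
    ∀ (xs : List String), (∀ x ∈ xs, key x ≤ c) →
    PySem.List.sorted xs key = PySem.List.sorted (xs.filter (fun x => decide (key x < c))) key
      ++ xs.filter (fun x => decide (key x = c)) := by
  intro xs
  induction xs using List.reverseRecOn with
  | nil => simp [PySem.List.sorted]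
  | append_singleton xs x ih =>
    intro h
    have hxs : ∀ y ∈ xs, key y ≤ c := fun y hy => h y (List.mem_append_left _ hy)
    have hx : key x ≤ c := h x (List.mem_append_right _ (List.mem_singleton.mpr rfl))
    have hsortstep : PySem.List.sorted (xs ++ [x]) key =
        PySem.List.insertBy (fun a b => decide (key a < key b)) x (PySem.List.sorted xs key) := by
      rw [PySem.List.sorted_eq_foldl_insertBy, List.foldl_append, List.foldl_cons, List.foldl_nil,
        ← PySem.List.sorted_eq_foldl_insertBy]
    rcases lt_or_eq_of_le hx with hlt | heq
    · have hfe : (xs ++ [x]).filter (fun y => decide (key y = c)) =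
          xs.filter (fun y => decide (key y = c)) := by
        rw [List.filter_append]
        simp [show ¬ key x = c by omega]
      have hfl : (xs ++ [x]).filter (fun y => decide (key y < c)) =
          xs.filter (fun y => decide (key y < c)) ++ [x] := by
        rw [List.filter_append]
        simp [hlt]
      rw [hsortstep, ih hxs, hfe, hfl]
      have hins := pvInsertBy_append (fun a b => decide (key a < key b)) x
        (PySem.List.sorted (xs.filter (fun y => decide (key y < c))) key)
        (xs.filter (fun y => decide (key y = c)))
        (by
          intro y hy
          rcases List.mem_filter.mp hy with ⟨_, h2⟩
          have : key y = c := by simpa using h2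
          simp [this, hlt])
      have hstep2 : PySem.List.sorted (xs.filter (fun y => decide (key y < c)) ++ [x]) key =
          PySem.List.insertBy (fun a b => decide (key a < key b)) x
            (PySem.List.sorted (xs.filter (fun y => decide (key y < c))) key) := by
        rw [PySem.List.sorted_eq_foldl_insertBy, List.foldl_append, List.foldl_cons,
          List.foldl_nil, ← PySem.List.sorted_eq_foldl_insertBy]
      rw [hstep2, hins]
    · have hfe : (xs ++ [x]).filter (fun y => decide (key y = c)) =
          xs.filter (fun y => decide (key y = c)) ++ [x] := by
        rw [List.filter_append]
        simp [heq]
      have hfl : (xs ++ [x]).filter (fun y => decide (key y < c)) =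
          xs.filter (fun y => decide (key y < c)) := by
        rw [List.filter_append]
        simp [show ¬ key x < c by omega]
      rw [hsortstep, ih hxs, hfe, hfl]
      rw [PySem.List.insertBy_of_forall_not_before _ _ _ ?_]
      · rw [List.append_assoc]
      · intro y hy
        have hy' : y ∈ PySem.List.sorted (xs.filter (fun y => decide (key y < c))) key ++
            xs.filter (fun y => decide (key y = c)) := hy
        have hymem : key y ≤ c := by
          rcases List.mem_append.mp hy' with h1 | h1
          · have := (PySem.List.sorted_perm _ _ _).mem_iff.mp h1
            rcases List.mem_filter.mp this with ⟨hm, _⟩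
            exact hxs y hm
          · rcases List.mem_filter.mp h1 with ⟨hm, _⟩
            exact hxs y hm
        simp only [decide_eq_false_iff_not]
        omega

-- ===== VERDICT (by name: the statement is the Claim_ definition above) =====
theorem reprioritize_overlay_targets_py_spec : Claim_equal_reprioritize_overlay_targets_py := by
  intro ov pr _
  show reprioritize_overlay_targets_py ov pr = reprioritize_overlay_targets_py_alt ov pr
  by_cases hov : ov = []
  · subst hov
    rfl
  · -- A's value
    have hA : reprioritize_overlay_targets_py ov pr =
        (ov.foldl pvF2 (pr.foldl (pvF1 ov) (([] : List String), ([] : List String)))).2 := by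
      unfold reprioritize_overlay_targets_py
      rw [if_neg hov]
      rfl
    set key : String → Int := fun t => (pvRank pr).getD t (pr.length : Int) with hkey
    set P : List String := (pvDr pr []).filter (fun t => decide (t ∈ ov)) with hPdef
    have hP : pvG1 ov pr [] = P := by
      rw [pvG1_filter]
      simp only [List.nil_append]
      rw [hPdef]
      apply List.filter_congr
      intro x _
      simp
    have hAv : reprioritize_overlay_targets_py ov pr =
        P ++ (pvDr ov []).filter (fun t => !P.contains t) := by
      rw [hA, pvL1, hP, pvL2, pvDr_filter]
    -- B's value
    have hBv : reprioritize_overlay_targets_py_alt ov pr =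
        PySem.List.sorted (pvDr ov []) key := by
      unfold reprioritize_overlay_targets_py_alt
      rw [pvDedup_eq_dr]
      rfl
    rw [hAv, hBv]
    rw [pvSplit key (pr.length : Int) (pvDr ov []) (fun x _ => pvKey_le pr x)]
    congr 1
    · -- priority part: the sorted low half is exactly P
      refine (PySem.List.sorted_eq_of_perm_of_pairwise_lt _ _ _ ?_ ?_).symm
      · -- P is a permutation of the low filter
        rw [List.perm_ext_iff_of_nodup (List.Nodup.filter _ (pvNodup_dr pr))
          (List.Nodup.filter _ (pvNodup_dr ov))]
        intro a
        simp only [List.mem_filter, pvMem_dr, decide_eq_true_eq]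
        constructor
        · rintro ⟨hpr, hov'⟩
          exact ⟨hov', (pvKey_lt_iff pr a).mpr hpr⟩
        · rintro ⟨hov', hlt⟩
          exact ⟨(pvKey_lt_iff pr a).mp hlt, hov'⟩
      · -- P is strictly increasing in the key
        have h1 : P.Pairwise (fun a b => pvFIdx pr a < pvFIdx pr b) :=
          List.Pairwise.filter _ (pvPairIdx pr)
        refine h1.imp_of_mem ?_
        intro a b ha hb hab
        have hamem : a ∈ pr := (pvMem_dr pr a).mp (List.mem_filter.mp ha).1
        have hbmem : b ∈ pr := (pvMem_dr pr b).mp (List.mem_filter.mp hb).1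
        show key a < key b
        rw [hkey]
        simp only [pvKey_mem hamem, pvKey_mem hbmem]
        exact_mod_cast hab
    · -- rest part: same filter over the dedup'd overlay
      apply List.filter_congr
      intro x hx
      have hxov : x ∈ ov := (pvMem_dr ov x).mp hx
      by_cases hp : x ∈ pr
      · have hxP : x ∈ P := by
          rw [hPdef]
          exact List.mem_filter.mpr ⟨(pvMem_dr pr x).mpr hp, by simpa using hxov⟩
        have h1 : key x < (pr.length : Int) := (pvKey_lt_iff pr x).mpr hp
        simp [hxP, show ¬ key x = (pr.length : Int) by omega]
      · have hxP : x ∉ P := by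
          rw [hPdef]
          intro hc
          exact hp ((pvMem_dr pr x).mp (List.mem_filter.mp hc).1)
        have hk : key x = (pr.length : Int) := (pvKey_eq_iff pr x).mpr hp
        simp [hxP, hk]
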